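-- pv_equiv track=rewrite | github.com/toutpuissantged/PhotoSlim | src/core/effet.py | _anime
-- ===== SOURCE A (Python) =====
-- def _anime(pixel):
--     min_pixel = 100
--     max_pixel = 200
--     coef_pixel = 10
--     error_pixel = 10
--     reponse = 0
--     if pixel < min_pixel:
--         reponse = 0
--     elif pixel < max_pixel:
--         for i in range(0,(max_pixel-min_pixel)//coef_pixel):
--             if (pixel-error_pixel) <= min_pixel + coef_pixel*i:
--                 reponse = min_pixel + coef_pixel*i
--                 break
--     else:
--         reponse = 255
--
--     return reponse
-- ===== SOURCE B (Python) =====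
-- def _anime(pixel):
--     if pixel < 100:
--         return 0
--     if pixel >= 200:
--         return 255
--     # closed form: smallest level 100+10*i with pixel-10 <= 100+10*i
--     i = (pixel - 101) // 10
--     if i < 0:
--         i = 0
--     return 100 + 10 * i
-- ===== Notes on version B (the rewrite author's own statement) =====
-- stated objective: simpler
-- what changed: The middle-branch scan over range(0,10) for the first matching step is replaced by a direct closed-form computation of the level index via floor division, clamped at 0.
import Mathlib
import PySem

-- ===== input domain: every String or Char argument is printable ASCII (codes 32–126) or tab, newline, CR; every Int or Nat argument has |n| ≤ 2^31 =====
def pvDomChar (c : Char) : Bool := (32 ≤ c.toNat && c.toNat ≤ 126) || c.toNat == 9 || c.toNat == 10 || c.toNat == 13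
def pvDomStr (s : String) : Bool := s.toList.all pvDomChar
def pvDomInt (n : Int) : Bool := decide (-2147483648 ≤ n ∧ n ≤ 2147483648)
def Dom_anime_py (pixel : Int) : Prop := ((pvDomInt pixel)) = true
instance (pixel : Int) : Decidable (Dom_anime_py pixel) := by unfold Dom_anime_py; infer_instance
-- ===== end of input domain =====

-- B replaces A's first-matching-step scan with a clamped floor-division closed form (simpler).

-- ===== PORT A =====
-- the for-loop with break: first i in the range with pixel-10 ≤ 100+10*i sets reponse; else reponse stays 0
def animeLoopA (pixel : Int) : List Int → Int
  | [] => 0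
  | i :: rest =>
    if pixel - 10 ≤ 100 + 10 * i then 100 + 10 * i else animeLoopA pixel rest

def anime_py (pixel : Int) : Int :=
  if pixel < 100 then 0
  else if pixel < 200 then
    animeLoopA pixel (PySem.List.pyRange 0 (PySem.Int.floordiv (200 - 100) 10) 1)
  else 255

-- ===== PORT B =====
def anime_py_alt (pixel : Int) : Int :=
  if pixel < 100 then 0
  else if pixel ≥ 200 then 255
  else
    let i := PySem.Int.floordiv (pixel - 101) 10
    let i := if i < 0 then 0 else i
    100 + 10 * i

-- ===== PRECONDITION & SPEC =====
def Spec_anime_py (pixel : Int) (out : Int) : Prop := out = anime_py_alt pixel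
instance (pixel : Int) (out : Int) : Decidable (Spec_anime_py pixel out) := by unfold Spec_anime_py; infer_instance

-- ===== CLAIM (what is proved, stated in full; the proofs are below) =====
def Claim_equal_anime_py : Prop := ∀ (pixel : Int), Dom_anime_py pixel → Spec_anime_py pixel (anime_py pixel)

-- ===== LEMMAS AND PROOFS =====

theorem anime_fdiv_eq (pixel : Int) :
    PySem.Int.floordiv (pixel - 101) 10 = (pixel - 101) / 10 := by
  simp [PySem.Int.floordiv, Int.fdiv_eq_ediv]

-- ===== VERDICT (by name: the statement is the Claim_ definition above) =====
theorem anime_py_spec : Claim_equal_anime_py := by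
  intro pixel _
  unfold Spec_anime_py anime_py anime_py_alt
  by_cases h1 : pixel < 100
  · simp [h1]
  · by_cases h2 : pixel < 200
    · have hr : PySem.List.pyRange 0 (PySem.Int.floordiv (200 - 100) 10) 1 =
          [0, 1, 2, 3, 4, 5, 6, 7, 8, 9] := by decide
      simp only [h1, h2, if_false, if_true, hr, animeLoopA, anime_fdiv_eq]
      have h3 : ¬ pixel ≥ 200 := by omega
      simp only [h3, if_false]
      split_ifs <;> omega
    · have h3 : pixel ≥ 200 := by omega
      simp [h1, h2, h3]
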